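-- pv_equiv track=rewrite | github.com/Renaxis-Math/Car-Price-Prediction | Confidential/Recruiting/Companies/Akuna/QR/OA/min_process_time.py | solve
-- ===== SOURCE A (Python) =====
-- def solve(n, processorTime, taskTime):
--
--     processorTime.sort()
--     taskTime.sort()
--     taskTime.reverse()
--
--     result, cur_task = 0, 0
--
--     for proctime in processorTime:
--         for i in range(4):
--             completionTime = proctime + taskTime[cur_task]
--             cur_task += 1
--             result = max(result, completionTime)
--
--     return result
-- ===== SOURCE B (Python) =====
-- def solve(n, processorTime, taskTime):
--     # Same in-place mutations as A: sort processors asc, tasks desc.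
--     processorTime.sort()
--     taskTime.sort()
--     taskTime.reverse()
--
--     def go(procs, tasks):
--         # Assign the LARGEST remaining processor the 4 smallest remaining
--         # tasks (the tail of the descending list); recurse on the rest.
--         # Correct because the optimal/greedy pairing matches processors
--         # ascending with groups of 4 tasks descending, and peeling the
--         # pair (max processor, last group) from the back yields the same
--         # set of pairs; the group's completion is tasks[-4] (its largest).
--         if not procs:
--             return 0
--         return max(go(procs[:-1], tasks[:-4]), procs[-1] + tasks[-4])
--
--     return go(processorTime, taskTime[:4 * len(processorTime)])
-- ===== Notes on version B (the rewrite author's own statement) =====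
-- stated objective: alternative
-- what changed: Replaces A's forward nested loop with running max and task cursor by a back-to-front recursion that repeatedly peels the largest processor together with the 4 smallest remaining tasks via negative slicing, reading only tasks[-4] per step.
import Mathlib
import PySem

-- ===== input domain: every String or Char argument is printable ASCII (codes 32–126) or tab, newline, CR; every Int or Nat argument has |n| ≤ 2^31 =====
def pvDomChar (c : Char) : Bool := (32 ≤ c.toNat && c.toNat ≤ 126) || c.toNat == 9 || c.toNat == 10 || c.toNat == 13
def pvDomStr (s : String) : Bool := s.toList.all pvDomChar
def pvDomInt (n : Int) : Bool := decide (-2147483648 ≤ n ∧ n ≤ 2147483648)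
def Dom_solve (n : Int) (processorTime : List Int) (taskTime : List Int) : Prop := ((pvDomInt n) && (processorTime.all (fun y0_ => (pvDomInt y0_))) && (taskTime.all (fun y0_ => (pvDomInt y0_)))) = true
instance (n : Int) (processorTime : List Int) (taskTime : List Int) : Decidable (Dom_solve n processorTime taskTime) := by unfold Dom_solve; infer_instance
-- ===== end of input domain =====

-- B replaces A's forward nested loop (running max + task cursor) by a back-to-front recursion
-- peeling the largest processor with the 4 smallest remaining tasks (alternative decomposition).
-- Both Pythons mutate processorTime/taskTime in place identically; equivalence is about the return value.

-- ===== PORT A =====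
def solve (n : Int) (processorTime : List Int) (taskTime : List Int) : Int :=
  let pt := PySem.List.sorted processorTime id false
  let tt := (PySem.List.sorted taskTime id false).reverse
  -- for proctime in pt: for i in range(4): …  (pyGetD is taskTime[cur_task]; Pre_ keeps it in range)
  let st := pt.foldl (fun (st : Int × Int) proctime =>
      (PySem.List.pyRange 0 4 1).foldl (fun (st : Int × Int) _ =>
        let completionTime := proctime + PySem.List.pyGetD tt st.2 0
        (max st.1 completionTime, st.2 + 1)) st) ((0 : Int), (0 : Int))
  st.1

-- ===== PORT B =====
-- go(procs, tasks): procs[:-1]/tasks[:-4] are slices; procs[-1]/tasks[-4] negative indexing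
-- (pyGetD's default is only reached outside Pre_, where the Python raises IndexError).
def bgo (procs tasks : List Int) : Int :=
  if procs = [] then 0
  else max (bgo (PySem.List.slice procs none (some (-1))) (PySem.List.slice tasks none (some (-4))))
           (PySem.List.pyGetD procs (-1) 0 + PySem.List.pyGetD tasks (-4) 0)
termination_by procs.length
decreasing_by
  rename_i h
  rw [PySem.List.slice_to_neg_one, List.length_dropLast]
  have := List.length_pos_of_ne_nil h
  omega

def solve_alt (n : Int) (processorTime : List Int) (taskTime : List Int) : Int :=
  let pt := PySem.List.sorted processorTime id false
  let tt := (PySem.List.sorted taskTime id false).reverse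
  bgo pt (PySem.List.slice tt none (some (4 * (pt.length : Int))))

-- ===== PRECONDITION & SPEC =====
-- Pre_ excludes exactly the inputs where A raises IndexError: fewer than 4 tasks per processor.
def Pre_solve (n : Int) (processorTime : List Int) (taskTime : List Int) : Prop :=
  4 * processorTime.length ≤ taskTime.length
instance (n : Int) (processorTime : List Int) (taskTime : List Int) : Decidable (Pre_solve n processorTime taskTime) := by unfold Pre_solve; infer_instance
def pvWitness_solve : Int × List Int × List Int := (2, [8, 10], [2, 2, 3, 1, 8, 7, 4, 5])

def Spec_solve (n : Int) (processorTime : List Int) (taskTime : List Int) (out : Int) : Prop := out = solve_alt n processorTime taskTime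
instance (n : Int) (processorTime : List Int) (taskTime : List Int) (out : Int) : Decidable (Spec_solve n processorTime taskTime out) := by unfold Spec_solve; infer_instance

-- ===== CLAIM (what is proved, stated in full; the proofs are below) =====
def Claim_equal_solve : Prop := ∀ (n : Int) (processorTime : List Int) (taskTime : List Int), Dom_solve n processorTime taskTime → Pre_solve n processorTime taskTime → Spec_solve n processorTime taskTime (solve n processorTime taskTime)

-- ===== LEMMAS AND PROOFS =====

-- A's double loop, with the group index made explicit (proof-side abstraction of A).
def ago (tt : List Int) : List Int → Nat → Int → Int
  | [], _, r => r
  | p :: ps, k, r => ago tt ps (k + 1) (max r (p + tt.getD (4 * k) 0))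

lemma desc_getD (tt : List Int) (h : tt.Pairwise (fun a b => b ≤ a)) (i j : Nat)
    (hij : i ≤ j) (hj : j < tt.length) : tt.getD j 0 ≤ tt.getD i 0 := by
  rcases Nat.eq_or_lt_of_le hij with rfl | hlt
  · exact le_refl _
  · have hi : i < tt.length := by omega
    have := (List.pairwise_iff_getElem).1 h i j hi hj hlt
    rwa [List.getD_eq_getElem _ _ hj, List.getD_eq_getElem _ _ hi]

lemma inner_step (tt : List Int) (p r c : Int) :
    (PySem.List.pyRange 0 4 1).foldl (fun (st : Int × Int) _ =>
        (max st.1 (p + PySem.List.pyGetD tt st.2 0), st.2 + 1)) (r, c)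
    = (max (max (max (max r (p + PySem.List.pyGetD tt c 0)) (p + PySem.List.pyGetD tt (c + 1) 0))
        (p + PySem.List.pyGetD tt (c + 1 + 1) 0)) (p + PySem.List.pyGetD tt (c + 1 + 1 + 1) 0),
        c + 1 + 1 + 1 + 1) := by
  rw [show PySem.List.pyRange 0 4 1 = [0, 1, 2, 3] from by decide]
  rfl

lemma loopA (tt : List Int) (hdesc : tt.Pairwise (fun a b => b ≤ a)) :
    ∀ (pts : List Int) (r : Int) (k : Nat), 4 * k + 4 * pts.length ≤ tt.length →
    (pts.foldl (fun (st : Int × Int) proctime =>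
        (PySem.List.pyRange 0 4 1).foldl (fun (st : Int × Int) _ =>
          (max st.1 (proctime + PySem.List.pyGetD tt st.2 0), st.2 + 1)) st)
      (r, ((4 * k : Nat) : Int))).1 = ago tt pts k r := by
  intro pts
  induction pts with
  | nil => intro r k _; simp [ago]
  | cons p ps ih =>
    intro r k hlen
    rw [List.foldl_cons, inner_step]
    have e0 : ((4 * k : Nat) : Int) + 1 = ((4 * k + 1 : Nat) : Int) := by push_cast; ring
    have e1 : ((4 * k + 1 : Nat) : Int) + 1 = ((4 * k + 2 : Nat) : Int) := by push_cast; ring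
    have e2 : ((4 * k + 2 : Nat) : Int) + 1 = ((4 * k + 3 : Nat) : Int) := by push_cast; ring
    have e3 : ((4 * k + 3 : Nat) : Int) + 1 = ((4 * (k + 1) : Nat) : Int) := by push_cast; ring
    rw [e0, e1, e2, e3, PySem.List.pyGetD_natCast, PySem.List.pyGetD_natCast,
      PySem.List.pyGetD_natCast, PySem.List.pyGetD_natCast]
    have hb : 4 * k + 3 < tt.length := by simp [List.length_cons] at hlen; omega
    have d1 : tt.getD (4 * k + 1) 0 ≤ tt.getD (4 * k) 0 := desc_getD tt hdesc _ _ (by omega) (by omega)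
    have d2 : tt.getD (4 * k + 2) 0 ≤ tt.getD (4 * k) 0 := desc_getD tt hdesc _ _ (by omega) (by omega)
    have d3 : tt.getD (4 * k + 3) 0 ≤ tt.getD (4 * k) 0 := desc_getD tt hdesc _ _ (by omega) hb
    have hmax : max (max (max (max r (p + tt.getD (4 * k) 0)) (p + tt.getD (4 * k + 1) 0))
        (p + tt.getD (4 * k + 2) 0)) (p + tt.getD (4 * k + 3) 0)
        = max r (p + tt.getD (4 * k) 0) := by omega
    rw [hmax, ih (max r (p + tt.getD (4 * k) 0)) (k + 1)
      (by simp [List.length_cons] at hlen; omega)]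
    rfl

lemma ago_append (tt : List Int) (p : Int) :
    ∀ (ps : List Int) (k : Nat) (r : Int),
    ago tt (ps ++ [p]) k r = max (ago tt ps k r) (p + tt.getD (4 * (k + ps.length)) 0) := by
  intro ps
  induction ps with
  | nil => intro k r; simp [ago]
  | cons q qs ih =>
    intro k r
    simp only [List.cons_append, ago, ih]
    congr 2
    simp [List.length_cons]; ring_nf

lemma pyGetD_neg_one_append (ps : List Int) (p : Int) :
    PySem.List.pyGetD (ps ++ [p]) (-1) 0 = p := by
  simp only [PySem.List.pyGetD, PySem.List.pyGet?, PySem.List.pyIdx?, List.length_append,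
    List.length_singleton]
  rw [if_neg (by omega), if_pos (by omega)]
  simp

lemma pyGetD_neg_four (ts : List Int) (h : 4 ≤ ts.length) :
    PySem.List.pyGetD ts (-4) 0 = ts.getD (ts.length - 4) 0 := by
  simp only [PySem.List.pyGetD, PySem.List.pyGet?, PySem.List.pyIdx?]
  rw [if_neg (by omega), if_pos (by omega)]
  have he : (-(-4 : Int)).toNat = 4 := by decide
  rw [he]
  have hlt : ts.length - 4 < ts.length := by omega
  simp [List.getElem?_eq_getElem hlt]

-- B's recursion on procs = ps ++ [p] with exactly 4·|procs| tasks equals one max-peel.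
lemma bgo_snoc (ps : List Int) (p : Int) (tt : List Int)
    (hlen : 4 * (ps.length + 1) ≤ tt.length) :
    bgo (ps ++ [p]) (tt.take (4 * (ps.length + 1)))
      = max (bgo ps (tt.take (4 * ps.length))) (p + tt.getD (4 * ps.length) 0) := by
  rw [bgo]
  have hne : ps ++ [p] ≠ [] := by simp
  rw [if_neg hne, PySem.List.slice_to_neg_one, List.dropLast_concat, pyGetD_neg_one_append]
  have htl : (tt.take (4 * (ps.length + 1))).length = 4 * (ps.length + 1) := by
    rw [List.length_take]; omega
  rw [PySem.List.slice_to_neg_ofNat _ 4 (by omega), htl]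
  have h1 : 4 * (ps.length + 1) - 4 = 4 * ps.length := by omega
  rw [h1, List.take_take, min_eq_left (by omega),
    pyGetD_neg_four _ (by rw [htl]; omega), htl, h1]
  have hlt : 4 * ps.length < tt.length := by omega
  have : (tt.take (4 * (ps.length + 1))).getD (4 * ps.length) 0 = tt.getD (4 * ps.length) 0 := by
    rw [List.getD_eq_getElem _ _ (by rw [htl]; omega), List.getD_eq_getElem _ _ hlt,
      List.getElem_take]
  rw [this, max_comm (bgo ps _)]

lemma ago_eq_bgo (tt : List Int) :
    ∀ (pts : List Int), 4 * pts.length ≤ tt.length →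
    ago tt pts 0 0 = bgo pts (tt.take (4 * pts.length)) := by
  intro pts
  induction pts using List.reverseRecOn with
  | nil => intro _; rw [bgo]; simp [ago]
  | append_singleton ps p ih =>
    intro hlen
    rw [List.length_append, List.length_singleton] at hlen
    rw [List.length_append, List.length_singleton,
      bgo_snoc ps p tt hlen, ago_append]
    rw [ih (by omega)]
    simp

-- ===== VERDICT (by name: the statement is the Claim_ definition above) =====
theorem solve_spec : Claim_equal_solve := by
  intro n processorTime taskTime _ hpre
  unfold Spec_solve
  simp only [solve, solve_alt]
  set pt := PySem.List.sorted processorTime id false with hpt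
  set tt := (PySem.List.sorted taskTime id false).reverse with htt
  have hdesc : tt.Pairwise (fun a b => b ≤ a) := by
    rw [htt, List.pairwise_reverse]
    exact PySem.List.sorted_pairwise taskTime id
  have hlenpt : pt.length = processorTime.length := by
    rw [hpt]; exact PySem.List.length_sorted _ _ _
  have hlentt : tt.length = taskTime.length := by
    rw [htt]; simp [PySem.List.length_sorted]
  have hlen : 4 * 0 + 4 * pt.length ≤ tt.length := by
    unfold Pre_solve at hpre; omega
  have hA := loopA tt hdesc pt 0 0 hlen
  simp only [Nat.mul_zero, Nat.cast_zero] at hA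
  rw [hA, ago_eq_bgo tt pt (by omega)]
  have hc : (4 : Int) * (pt.length : Int) = ((4 * pt.length : Nat) : Int) := by push_cast; ring
  rw [hc, PySem.List.slice_to_natCast]
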